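-- pv_equiv track=rewrite | github.com/com-oneredboot/orb-integration-hub | apps/api/lambdas/permission_resolution/index.py | _merge_permissions
-- ===== SOURCE A (Python) =====
-- from typing import Any
--
-- def _merge_permissions(
--
--     direct_roles: list[dict[str, Any]],
--     group_roles: list[dict[str, Any]],
-- ) -> list[str]:
--     """Merge permissions from direct and group roles.
--
--     Implements:
--     - Property 5: Direct Role Priority - direct permissions always included
--     - Property 6: Permission Union - result is union of all permissions
--
--     The merge is a simple union - all permissions from all sources are combined.
--     Direct roles don't "override" group roles in the sense of removing permissions,
--     they just ensure direct permissions are always present.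
--     """
--     all_permissions: set[str] = set()
--
--     # Add direct role permissions first (Property 5: always included)
--     for role in direct_roles:
--         permissions = role.get("permissions", [])
--         all_permissions.update(permissions)
--
--     # Add group role permissions (Property 6: union)
--     for role in group_roles:
--         permissions = role.get("permissions", [])
--         all_permissions.update(permissions)
--
--     # Sort for deterministic ordering (Property 4)
--     return sorted(all_permissions)
-- ===== SOURCE B (Python) =====
-- def _merge_permissions(
--     direct_roles: list,
--     group_roles: list,
-- ) -> list:
--     """Concatenate all permission lists, sort with duplicates, emit each value
--     once by tracking the previously emitted element in a scan variable."""
--     flat = sorted(p for role in direct_roles + group_roles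
--                     for p in role.get("permissions", []))
--     out: list = []
--     prev = None
--     for p in flat:
--         if prev != p:
--             out.append(p)
--             prev = p
--     return out
-- ===== Notes on version B (the rewrite author's own statement) =====
-- stated objective: alternative
-- what changed: Replaces the hash-set union with a flatten-sort-scan: the permission lists of all roles (direct_roles + group_roles concatenated) are flattened into one list with duplicates, sorted, and deduplicated in a single linear scan that keeps a 'previous emitted element' variable.
import Mathlib
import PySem

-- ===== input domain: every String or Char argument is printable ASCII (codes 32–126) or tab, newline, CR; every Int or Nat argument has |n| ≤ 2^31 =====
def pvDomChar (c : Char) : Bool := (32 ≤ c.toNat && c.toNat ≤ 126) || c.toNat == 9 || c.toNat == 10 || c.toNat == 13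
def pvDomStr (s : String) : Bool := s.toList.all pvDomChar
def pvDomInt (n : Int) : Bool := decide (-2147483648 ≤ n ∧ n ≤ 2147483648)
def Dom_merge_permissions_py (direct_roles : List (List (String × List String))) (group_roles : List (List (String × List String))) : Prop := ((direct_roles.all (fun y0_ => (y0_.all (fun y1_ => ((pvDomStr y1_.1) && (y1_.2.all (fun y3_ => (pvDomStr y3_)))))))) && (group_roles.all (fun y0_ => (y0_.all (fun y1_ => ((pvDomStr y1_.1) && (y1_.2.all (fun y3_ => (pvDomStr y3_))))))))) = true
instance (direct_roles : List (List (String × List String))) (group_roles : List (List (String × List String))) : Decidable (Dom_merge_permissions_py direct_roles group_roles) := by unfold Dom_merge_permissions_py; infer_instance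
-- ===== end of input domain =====

-- B replaces A's hash-set union with flatten (over the concatenated role list), sort, then a
-- single dedup scan tracking the previously emitted element (same cost; alternative algorithm).

-- ===== PORT A =====
-- all_permissions = set(); for role in direct_roles: update; for role in group_roles: update; return sorted(all_permissions)
def merge_permissions_py (direct_roles : List (List (String × List String))) (group_roles : List (List (String × List String))) : List String :=
  let s0 : PySem.Set String := PySem.Set.empty
  let s1 := direct_roles.foldl (fun s role => PySem.Set.update s (PySem.Dict.getD (PySem.Dict.mk role) "permissions" [])) s0
  let s2 := group_roles.foldl (fun s role => PySem.Set.update s (PySem.Dict.getD (PySem.Dict.mk role) "permissions" [])) s1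
  PySem.List.sorted s2 (fun x => x) false

-- ===== PORT B =====
-- flat = sorted(p for role in direct_roles + group_roles for p in role.get("permissions", []))
-- out = []; prev = None; for p in flat: if prev != p: out.append(p); prev = p
def merge_permissions_py_alt (direct_roles : List (List (String × List String))) (group_roles : List (List (String × List String))) : List String :=
  let flat := PySem.List.sorted ((direct_roles ++ group_roles).flatMap (fun role => PySem.Dict.getD (PySem.Dict.mk role) "permissions" [])) (fun x => x) false
  (flat.foldl (fun st p => if st.2 ≠ some p then (st.1 ++ [p], some p) else st)
      (([] : List String), (none : Option String))).1

-- ===== PRECONDITION & SPEC =====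
def Spec_merge_permissions_py (direct_roles : List (List (String × List String))) (group_roles : List (List (String × List String))) (out : List String) : Prop := out = merge_permissions_py_alt direct_roles group_roles
instance (direct_roles : List (List (String × List String))) (group_roles : List (List (String × List String))) (out : List String) : Decidable (Spec_merge_permissions_py direct_roles group_roles out) := by unfold Spec_merge_permissions_py; infer_instance

-- ===== CLAIM (what is proved, stated in full; the proofs are below) =====
def Claim_equal_merge_permissions_py : Prop := ∀ (direct_roles : List (List (String × List String))) (group_roles : List (List (String × List String))), Dom_merge_permissions_py direct_roles group_roles → Spec_merge_permissions_py direct_roles group_roles (merge_permissions_py direct_roles group_roles)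

-- ===== LEMMAS AND PROOFS =====

-- A's role loop is Set.update with the concatenation of the per-role permission lists.
theorem foldl_setUpdate_eq_update_flatMap (roles : List (List (String × List String))) (s : PySem.Set String) :
    roles.foldl (fun s role => PySem.Set.update s (PySem.Dict.getD (PySem.Dict.mk role) "permissions" [])) s
      = PySem.Set.update s (roles.flatMap (fun role => PySem.Dict.getD (PySem.Dict.mk role) "permissions" [])) := by
  induction roles generalizing s with
  | nil => simp [PySem.Set.update]
  | cons r rest ih =>
    simp only [List.foldl_cons, List.flatMap_cons, ih]
    simp [PySem.Set.update, List.foldl_append]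

-- B's prev variable always equals out.getLast?, so the scan equals a getLast?-based fold.
theorem foldl_prev_eq_foldl_getLast (l : List String) :
    ∀ out : List String,
      (l.foldl (fun st p => if st.2 ≠ some p then (st.1 ++ [p], some p) else st) (out, out.getLast?)).1
        = l.foldl (fun result p => if result.getLast? = some p then result else result ++ [p]) out := by
  induction l with
  | nil => intro out; rfl
  | cons p rest ih =>
    intro out
    by_cases h : out.getLast? = some p
    · simp only [List.foldl_cons, h, ne_eq, not_true_eq_false, if_pos]
      simpa [h] using ih out
    · simp only [List.foldl_cons, if_pos h, if_neg h]
      have : (out ++ [p]).getLast? = some p := by simp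
      simpa [this] using ih (out ++ [p])

-- The getLast?-based dedup fold: invariant on the accumulator.
theorem dedupAdj_invariant (l : List String) :
    ∀ acc : List String, l.Pairwise (· ≤ ·) → acc.Pairwise (· < ·) →
      (∀ a ∈ acc, ∀ x ∈ l, a ≤ x) →
      ((l.foldl (fun result p => if result.getLast? = some p then result else result ++ [p]) acc).Pairwise (· < ·)
        ∧ ∀ y, y ∈ l.foldl (fun result p => if result.getLast? = some p then result else result ++ [p]) acc ↔ (y ∈ acc ∨ y ∈ l)) := by
  induction l with
  | nil => intro acc _ hacc _; simpa using hacc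
  | cons p rest ih =>
    intro acc hl hacc hle
    have hl' : rest.Pairwise (· ≤ ·) := hl.of_cons
    have hple : ∀ x ∈ rest, p ≤ x := fun x hx => (List.pairwise_cons.mp hl).1 x hx
    by_cases hlast : acc.getLast? = some p
    · have hpmem : p ∈ acc := by
        cases acc with
        | nil => simp at hlast
        | cons a t => exact List.mem_of_getLast? hlast
      have := ih acc hl' hacc (by
        intro a ha x hx
        exact le_trans (hle a ha p (by simp)) (hple x hx))
      simp only [List.foldl_cons, if_pos hlast]
      refine ⟨this.1, fun y => ?_⟩
      rw [(this.2 y)]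
      constructor
      · rintro (h | h)
        · exact Or.inl h
        · exact Or.inr (List.mem_cons_of_mem _ h)
      · rintro (h | h)
        · exact Or.inl h
        · rcases List.mem_cons.mp h with h | h
          · exact Or.inl (h ▸ hpmem)
          · exact Or.inr h
    · -- append p
      have hlt : ∀ a ∈ acc, a < p := by
        intro a ha
        cases h : acc.getLast? with
        | none => rw [List.getLast?_eq_none_iff] at h; subst h; simp at ha
        | some b =>
          have hbp : b ≠ p := fun e => hlast (by rw [h, e])
          have hble : b ≤ p := hle b (List.mem_of_getLast? h) p (by simp)
          have hab : a ≤ b := by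
            rcases List.getLast?_eq_some_iff.mp h with ⟨pre, hpre⟩
            subst hpre
            rcases List.mem_append.mp ha with h1 | h1
            · exact le_of_lt ((List.pairwise_append.mp hacc).2.2 a h1 b (by simp))
            · simp at h1; subst h1; exact le_refl _
          exact lt_of_le_of_lt hab (lt_of_le_of_ne hble hbp)
      have hacc' : (acc ++ [p]).Pairwise (· < ·) := by
        rw [List.pairwise_append]
        exact ⟨hacc, by simp, by intro a ha b hb; simp at hb; subst hb; exact hlt a ha⟩
      have hle' : ∀ a ∈ acc ++ [p], ∀ x ∈ rest, a ≤ x := by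
        intro a ha x hx
        rcases List.mem_append.mp ha with h | h
        · exact hle a h x (List.mem_cons_of_mem _ hx)
        · simp at h; subst h; exact hple x hx
      have := ih (acc ++ [p]) hl' hacc' hle'
      simp only [List.foldl_cons, if_neg hlast]
      refine ⟨this.1, fun y => ?_⟩
      rw [this.2 y]
      simp [List.mem_append, List.mem_cons]
      tauto

-- Core: sorted(set(xs)) equals the getLast?-based dedup fold over sorted(xs).
theorem sorted_ofList_eq_dedupAdj_sorted (xs : List String) :
    PySem.List.sorted (PySem.Set.ofList xs) (fun x => x) false
      = (PySem.List.sorted xs (fun x => x) false).foldl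
          (fun result p => if result.getLast? = some p then result else result ++ [p]) [] := by
  set srt := PySem.List.sorted xs (fun x => x) false with hsrt
  have hpair : srt.Pairwise (· ≤ ·) := by
    simpa using PySem.List.sorted_pairwise xs (fun x => x)
  have hinv := dedupAdj_invariant srt [] hpair (by simp) (by simp)
  set R := srt.foldl (fun result p => if result.getLast? = some p then result else result ++ [p]) [] with hR
  have hRlt : R.Pairwise (· < ·) := hinv.1
  have hRmem : ∀ y, y ∈ R ↔ y ∈ xs := by
    intro y
    rw [hinv.2 y, hsrt]
    simp [PySem.List.mem_sorted]
  have hRnodup : R.Nodup := hRlt.imp ne_of_lt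
  have hperm : R.Perm (PySem.Set.ofList xs) := by
    apply List.perm_of_nodup_nodup_toFinset_eq hRnodup (PySem.Set.nodup_ofList xs)
    ext y
    simp [List.mem_toFinset, hRmem, PySem.Set.mem_ofList]
  exact PySem.List.sorted_eq_of_perm_of_pairwise_lt _ _ _ hperm hRlt

-- ===== VERDICT (by name: the statement is the Claim_ definition above) =====
theorem merge_permissions_py_spec : Claim_equal_merge_permissions_py := by
  intro dr gr _
  unfold Spec_merge_permissions_py merge_permissions_py merge_permissions_py_alt
  simp only [foldl_setUpdate_eq_update_flatMap, List.flatMap_append]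
  have hset : ∀ F1 F2 : List String,
      PySem.Set.update (PySem.Set.update PySem.Set.empty F1) F2 = PySem.Set.ofList (F1 ++ F2) := by
    intro F1 F2
    simp [PySem.Set.ofList, PySem.Set.update, PySem.Set.empty, List.foldl_append]
  rw [hset]
  have hprev := foldl_prev_eq_foldl_getLast
    (PySem.List.sorted ((dr.flatMap (fun role => PySem.Dict.getD (PySem.Dict.mk role) "permissions" []))
        ++ (gr.flatMap (fun role => PySem.Dict.getD (PySem.Dict.mk role) "permissions" []))) (fun x => x) false) []
  simp only [List.getLast?_nil] at hprev
  rw [hprev]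
  exact sorted_ofList_eq_dedupAdj_sorted _
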